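-- pv_equiv track=rewrite | github.com/saidaladawi/universal-workshop-erp | phase3_backup/after-system_administration/universal_workshop/analytics_reporting/doctype/migration_dashboard/migration_dashboard.py | _generate_error_recommendations
-- ===== SOURCE A (Python) =====
-- from typing import Dict, List, Any, Optional
--
-- def _generate_error_recommendations(top_errors: List[Dict]) -> List[str]:
--     """Generate recommendations based on error patterns"""
--
--     recommendations = []
--
--     if not top_errors:
--         return recommendations
--
--     # Check for validation errors
--     validation_errors = [
--         e for e in top_errors if "validation" in e.get("error_category", "").lower()
--     ]
--     if validation_errors:
--         recommendations.append(
--             "Review data validation rules - multiple validation errors detected"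
--         )
--
--     # Check for performance issues
--     timeout_errors = [e for e in top_errors if "timeout" in e.get("error_message", "").lower()]
--     if timeout_errors:
--         recommendations.append("Consider increasing timeout values or optimizing batch sizes")
--
--     # Check for data quality issues
--     duplicate_errors = [
--         e for e in top_errors if "duplicate" in e.get("error_message", "").lower()
--     ]
--     if duplicate_errors:
--         recommendations.append("Implement duplicate detection and resolution strategy")
--
--     return recommendations
-- ===== SOURCE B (Python) =====
-- def _generate_error_recommendations(top_errors):
--     """Generate recommendations based on error patterns (single pass with flags)."""
--     saw_validation = saw_timeout = saw_duplicate = False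
--     for e in top_errors:
--         if "validation" in e.get("error_category", "").lower():
--             saw_validation = True
--         if "timeout" in e.get("error_message", "").lower():
--             saw_timeout = True
--         if "duplicate" in e.get("error_message", "").lower():
--             saw_duplicate = True
--     recommendations = []
--     if saw_validation:
--         recommendations.append("Review data validation rules - multiple validation errors detected")
--     if saw_timeout:
--         recommendations.append("Consider increasing timeout values or optimizing batch sizes")
--     if saw_duplicate:
--         recommendations.append("Implement duplicate detection and resolution strategy")
--     return recommendations
-- ===== Notes on version B (the rewrite author's own statement) =====
-- stated objective: simpler
-- what changed: Replaces the three separate list-comprehension scans (building intermediate filtered lists) with one loop over top_errors maintaining three boolean flags, then emits the same three recommendation strings in order.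
import Mathlib
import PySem

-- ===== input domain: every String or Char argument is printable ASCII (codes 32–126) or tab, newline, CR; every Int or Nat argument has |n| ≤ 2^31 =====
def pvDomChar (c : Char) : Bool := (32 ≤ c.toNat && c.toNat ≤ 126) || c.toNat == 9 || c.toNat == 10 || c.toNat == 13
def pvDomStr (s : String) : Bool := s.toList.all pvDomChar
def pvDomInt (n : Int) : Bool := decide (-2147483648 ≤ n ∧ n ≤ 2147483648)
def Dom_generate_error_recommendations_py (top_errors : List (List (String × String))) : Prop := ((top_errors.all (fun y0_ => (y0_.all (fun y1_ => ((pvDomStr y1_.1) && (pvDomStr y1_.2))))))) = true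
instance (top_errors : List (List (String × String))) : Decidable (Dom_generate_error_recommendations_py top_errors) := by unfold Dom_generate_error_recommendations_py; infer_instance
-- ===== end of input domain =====

-- B replaces A's three list-comprehension scans by one loop keeping three boolean flags (objective: simpler).

-- ===== PORT A =====
-- "validation" in e.get("error_category", "").lower()
def pvIsValidation (e : List (String × String)) : Bool :=
  PySem.Str.isIn "validation" (PySem.Str.lower ((PySem.Dict.mk e).getD "error_category" ""))
-- "timeout" in e.get("error_message", "").lower()
def pvIsTimeout (e : List (String × String)) : Bool :=
  PySem.Str.isIn "timeout" (PySem.Str.lower ((PySem.Dict.mk e).getD "error_message" ""))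
-- "duplicate" in e.get("error_message", "").lower()
def pvIsDuplicate (e : List (String × String)) : Bool :=
  PySem.Str.isIn "duplicate" (PySem.Str.lower ((PySem.Dict.mk e).getD "error_message" ""))

def generate_error_recommendations_py (top_errors : List (List (String × String))) : List String :=
  let recommendations : List String := []
  if top_errors = [] then recommendations
  else
    let validation_errors := top_errors.filter pvIsValidation
    let recommendations :=
      if validation_errors ≠ [] then
        recommendations ++ ["Review data validation rules - multiple validation errors detected"]
      else recommendations
    let timeout_errors := top_errors.filter pvIsTimeout
    let recommendations :=
      if timeout_errors ≠ [] then
        recommendations ++ ["Consider increasing timeout values or optimizing batch sizes"]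
      else recommendations
    let duplicate_errors := top_errors.filter pvIsDuplicate
    let recommendations :=
      if duplicate_errors ≠ [] then
        recommendations ++ ["Implement duplicate detection and resolution strategy"]
      else recommendations
    recommendations

-- ===== PORT B =====
def generate_error_recommendations_py_alt (top_errors : List (List (String × String))) : List String :=
  let flags :=
    top_errors.foldl
      (fun (f : Bool × Bool × Bool) e =>
        (f.1 || pvIsValidation e, f.2.1 || pvIsTimeout e, f.2.2 || pvIsDuplicate e))
      (false, false, false)
  let recommendations : List String := []
  let recommendations :=
    if flags.1 then recommendations ++ ["Review data validation rules - multiple validation errors detected"]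
    else recommendations
  let recommendations :=
    if flags.2.1 then recommendations ++ ["Consider increasing timeout values or optimizing batch sizes"]
    else recommendations
  let recommendations :=
    if flags.2.2 then recommendations ++ ["Implement duplicate detection and resolution strategy"]
    else recommendations
  recommendations

-- ===== PRECONDITION & SPEC =====
def Spec_generate_error_recommendations_py (top_errors : List (List (String × String))) (out : List String) : Prop := out = generate_error_recommendations_py_alt top_errors
instance (top_errors : List (List (String × String))) (out : List String) : Decidable (Spec_generate_error_recommendations_py top_errors out) := by unfold Spec_generate_error_recommendations_py; infer_instance

-- ===== CLAIM (what is proved, stated in full; the proofs are below) =====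
def Claim_equal_generate_error_recommendations_py : Prop := ∀ (top_errors : List (List (String × String))), Dom_generate_error_recommendations_py top_errors → Spec_generate_error_recommendations_py top_errors (generate_error_recommendations_py top_errors)

-- ===== LEMMAS AND PROOFS =====
theorem pvFlags_eq (l : List (List (String × String))) (a b c : Bool) :
    l.foldl
      (fun (f : Bool × Bool × Bool) e =>
        (f.1 || pvIsValidation e, f.2.1 || pvIsTimeout e, f.2.2 || pvIsDuplicate e))
      (a, b, c)
    = (a || l.any pvIsValidation, b || l.any pvIsTimeout, c || l.any pvIsDuplicate) := by
  induction l generalizing a b c with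
  | nil => simp
  | cons x xs ih => simp [List.foldl_cons, ih, Bool.or_assoc]

theorem pvFilter_ne_nil_iff_any (p : List (String × String) → Bool)
    (l : List (List (String × String))) : (l.filter p ≠ []) ↔ l.any p = true := by
  rw [Ne, List.filter_eq_nil_iff]
  push_neg
  simp [List.any_eq_true]

-- ===== VERDICT (by name: the statement is the Claim_ definition above) =====
theorem generate_error_recommendations_py_spec : Claim_equal_generate_error_recommendations_py := by
  intro top_errors _
  unfold Spec_generate_error_recommendations_py
  unfold generate_error_recommendations_py generate_error_recommendations_py_alt
  rcases top_errors with _ | ⟨x, xs⟩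
  · rfl
  · have hne : ¬ ((x :: xs : List (List (String × String))) = []) := by simp
    rw [if_neg hne]
    simp only [pvFlags_eq, Bool.false_or, pvFilter_ne_nil_iff_any]
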